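-- pv_equiv track=rewrite | github.com/deyvo7/Python | 6. Dictionaries stacks and queues/5-9.py | count_vehicles_by_province
-- ===== SOURCE A (Python) =====
-- def count_vehicles_by_province(vehicle_numbers, provinces):
--     vehicle_counts = {province: 0 for province in provinces.values()}  # Tworzymy słownik, w którym dla każdego województwa zaczynamy od liczby 0
--
--     for vehicle in vehicle_numbers:  # Iterujemy po każdym numerze rejestracyjnym
--         first_letter = vehicle[0]  # Pierwsza litera numeru rejestracyjnego odpowiada województwu
--         if first_letter in provinces:  # Jeśli ta litera jest w słowniku województw
--             province = provinces[first_letter]  # Pobieramy nazwę województwa na podstawie litery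
--             vehicle_counts[province] += 1  # Zwiększamy licznik pojazdów dla danego województwa
--
--     return vehicle_counts  # Zwracamy słownik, w którym dla każdego województwa mamy liczbę pojazdów
-- ===== SOURCE B (Python) =====
-- def count_vehicles_by_province(vehicle_numbers, provinces):
--     # Two staged passes of different shape: (1) build a histogram of FIRST LETTERS,
--     # never consulting provinces; (2) aggregate that histogram through
--     # provinces.items() into a zero-initialized result keyed by province name.
--     letter_counts = {}
--     for v in vehicle_numbers:
--         letter_counts[v[0]] = letter_counts.get(v[0], 0) + 1
--     result = {province: 0 for province in provinces.values()}
--     for letter, province in provinces.items():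
--         result[province] += letter_counts.get(letter, 0)
--     return result
-- ===== Notes on version B (the rewrite author's own statement) =====
-- stated objective: alternative
-- what changed: B inverts the data flow: it first builds a histogram of first letters without ever consulting the provinces mapping, then aggregates that histogram by iterating provinces.items(), whereas A resolves each vehicle to its province inside a single guarded loop over vehicles mutating a pre-initialized dict.
import Mathlib
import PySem

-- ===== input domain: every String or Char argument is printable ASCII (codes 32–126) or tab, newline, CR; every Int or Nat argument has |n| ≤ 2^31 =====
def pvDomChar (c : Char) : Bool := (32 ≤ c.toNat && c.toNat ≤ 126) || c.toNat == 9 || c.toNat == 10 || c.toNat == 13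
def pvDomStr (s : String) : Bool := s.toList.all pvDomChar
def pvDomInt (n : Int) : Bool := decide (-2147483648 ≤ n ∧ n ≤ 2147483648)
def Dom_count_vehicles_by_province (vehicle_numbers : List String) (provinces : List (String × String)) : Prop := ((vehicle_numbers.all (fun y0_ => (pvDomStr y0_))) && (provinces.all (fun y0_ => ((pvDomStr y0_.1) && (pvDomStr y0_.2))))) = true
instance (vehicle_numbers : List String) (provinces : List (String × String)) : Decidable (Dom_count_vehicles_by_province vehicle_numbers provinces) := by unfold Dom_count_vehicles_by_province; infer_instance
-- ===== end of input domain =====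

-- B inverts the data flow: a histogram of first letters is built without consulting the
-- provinces mapping, then aggregated through provinces.items(); alternative structure, same cost.


-- ===== PORT A =====
-- literal port of A: pre-initialized zero dict, then one guarded loop mutating it in place.
def count_vehicles_by_province (vehicle_numbers : List String) (provinces : List (String × String)) : List (String × Int) :=
  let P : PySem.Dict String String := PySem.Dict.mk provinces
  -- vehicle_counts = {province: 0 for province in provinces.values()}
  let vehicle_counts : PySem.Dict String Int :=
    P.values.foldl (fun d province => d.insert province 0) PySem.Dict.empty
  let final : PySem.Dict String Int :=
    vehicle_numbers.foldl (fun d vehicle =>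
      match PySem.Str.pyGet? vehicle 0 with
      | none => d            -- vehicle[0]: IndexError on the empty string; excluded by Pre_
      | some c =>
        let first_letter := String.ofList [c]
        if P.contains first_letter then
          match P.get? first_letter with
          | some province => d.modify province 0 (· + 1)   -- vehicle_counts[province] += 1 (key always present)
          | none => d
        else d) vehicle_counts
  final.items

-- ===== PORT B =====
-- literal port of B (Source B): letter histogram first (provinces untouched), then aggregation over provinces.items().
def count_vehicles_by_province_alt (vehicle_numbers : List String) (provinces : List (String × String)) : List (String × Int) :=
  let P : PySem.Dict String String := PySem.Dict.mk provinces
  -- letter_counts[v[0]] = letter_counts.get(v[0], 0) + 1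
  let letter_counts : PySem.Dict String Int :=
    vehicle_numbers.foldl (fun d v =>
      match PySem.Str.pyGet? v 0 with
      | none => d            -- v[0]: IndexError on the empty string; excluded by Pre_
      | some c => d.insert (String.ofList [c]) (d.getD (String.ofList [c]) 0 + 1)) PySem.Dict.empty
  -- result = {province: 0 for province in provinces.values()}
  let result0 : PySem.Dict String Int :=
    P.values.foldl (fun d province => d.insert province 0) PySem.Dict.empty
  -- for letter, province in provinces.items(): result[province] += letter_counts.get(letter, 0)
  (P.items.foldl (fun d lp => d.modify lp.2 0 (fun x => x + letter_counts.getD lp.1 0)) result0).items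

-- ===== PRECONDITION & SPEC =====
-- Pre_ excludes (a) inputs on which A raises IndexError (an empty string among vehicle_numbers) and
-- (b) association lists with duplicate keys in provinces, which encode no Python dict (a Python dict
-- always has distinct keys), so nothing A accepts as a dict is excluded by (b).
def Pre_count_vehicles_by_province (vehicle_numbers : List String) (provinces : List (String × String)) : Prop :=
  (provinces.map (·.1)).Nodup ∧ ∀ v ∈ vehicle_numbers, v.toList ≠ []
instance (vehicle_numbers : List String) (provinces : List (String × String)) : Decidable (Pre_count_vehicles_by_province vehicle_numbers provinces) := by unfold Pre_count_vehicles_by_province; infer_instance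

def pvWitness_count_vehicles_by_province : List String × (List (String × String)) :=
  (["KR123", "WA77", "G1"], [("K", "Malopolskie"), ("W", "Mazowieckie")])

def Spec_count_vehicles_by_province (vehicle_numbers : List String) (provinces : List (String × String)) (out : List (String × Int)) : Prop := out = count_vehicles_by_province_alt vehicle_numbers provinces
instance (vehicle_numbers : List String) (provinces : List (String × String)) (out : List (String × Int)) : Decidable (Spec_count_vehicles_by_province vehicle_numbers provinces out) := by unfold Spec_count_vehicles_by_province; infer_instance

-- ===== CLAIM (what is proved, stated in full; the proofs are below) =====
def Claim_equal_count_vehicles_by_province : Prop := ∀ (vehicle_numbers : List String) (provinces : List (String × String)), Dom_count_vehicles_by_province vehicle_numbers provinces → Pre_count_vehicles_by_province vehicle_numbers provinces → Spec_count_vehicles_by_province vehicle_numbers provinces (count_vehicles_by_province vehicle_numbers provinces)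

-- ===== LEMMAS AND PROOFS =====

-- the (optional) first letter of a vehicle number, as a 1-char string
def pvLetter (v : String) : Option String :=
  match PySem.Str.pyGet? v 0 with
  | none => none
  | some c => some (String.ofList [c])

-- the province a vehicle number hits, if any
def pvHit (P : PySem.Dict String String) (v : String) : Option String :=
  match pvLetter v with
  | none => none
  | some l => P.get? l

-- A's loop body, expressed through pvHit
theorem pvStepA (P : PySem.Dict String String) (d : PySem.Dict String Int) (v : String) :
    (match PySem.Str.pyGet? v 0 with
     | none => d
     | some c =>
       let first_letter := String.ofList [c]
       if P.contains first_letter then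
         match P.get? first_letter with
         | some province => d.modify province 0 (· + 1)
         | none => d
       else d)
    = (match pvHit P v with
       | none => d
       | some p => d.modify p 0 (· + 1)) := by
  unfold pvHit pvLetter
  rcases hg : PySem.Str.pyGet? v 0 with _ | c
  · rfl
  · rcases hp : P.get? (String.ofList [c]) with _ | p
    · have hc : P.contains (String.ofList [c]) = false := by
        rw [PySem.Dict.contains_eq_isSome_get?, hp]; rfl
      simp only [hc, Bool.false_eq_true, if_false, hp]
    · have hc : P.contains (String.ofList [c]) = true := by
        rw [PySem.Dict.contains_eq_isSome_get?, hp]; rfl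
      simp only [hc, if_true, hp]

-- A's loop is the modify-counting loop over the list of hits
theorem pvA_loop_eq (P : PySem.Dict String String) (vns : List String) (d : PySem.Dict String Int) :
    vns.foldl (fun d vehicle =>
      match PySem.Str.pyGet? vehicle 0 with
      | none => d
      | some c =>
        let first_letter := String.ofList [c]
        if P.contains first_letter then
          match P.get? first_letter with
          | some province => d.modify province 0 (· + 1)
          | none => d
        else d) d
    = (vns.filterMap (pvHit P)).foldl (fun d x => d.modify x 0 (· + 1)) d := by
  induction vns generalizing d with
  | nil => rfl
  | cons v t ih =>
    rw [List.foldl_cons, List.filterMap_cons, pvStepA P d v]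
    rcases pvHit P v with _ | p
    · exact ih d
    · rw [List.foldl_cons]; exact ih _

-- the list of hits is the list of letters pushed through the provinces lookup
theorem pvHit_decomp (P : PySem.Dict String String) (vns : List String) :
    vns.filterMap (pvHit P) = (vns.filterMap pvLetter).filterMap (fun l => P.get? l) := by
  have hfun : pvHit P = fun v => (pvLetter v).bind (fun l => P.get? l) := by
    funext v; unfold pvHit; cases pvLetter v <;> rfl
  rw [hfun, List.filterMap_filterMap]

-- B's histogram loop is the insert-counting loop over the list of letters
theorem pvB_hist_eq (vns : List String) (d : PySem.Dict String Int) :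
    vns.foldl (fun d v =>
      match PySem.Str.pyGet? v 0 with
      | none => d
      | some c => d.insert (String.ofList [c]) (d.getD (String.ofList [c]) 0 + 1)) d
    = (vns.filterMap pvLetter).foldl (fun d x => d.insert x (d.getD x 0 + 1)) d := by
  induction vns generalizing d with
  | nil => rfl
  | cons v t ih =>
    rw [List.foldl_cons, List.filterMap_cons]
    unfold pvLetter
    rcases PySem.Str.pyGet? v 0 with _ | c
    · exact ih d
    · rw [List.foldl_cons]; exact ih _

-- the zero-initialising fold keeps every value 0
theorem pvInit_getD (l : List String) (d : PySem.Dict String Int) (k : String)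
    (h : d.getD k 0 = 0) : (l.foldl (fun d p => d.insert p 0) d).getD k 0 = 0 := by
  induction l generalizing d with
  | nil => exact h
  | cons p t ih =>
    rw [List.foldl_cons]
    apply ih
    rw [PySem.Dict.getD_insert]
    split_ifs <;> simp [h]

-- B's aggregation fold: it adds, per item with value k, the weight of its key
theorem pvAgg_getD (g : String × String → Int) (ps : List (String × String)) (d : PySem.Dict String Int) (k : String) :
    (ps.foldl (fun d lp => d.modify lp.2 0 (fun x => x + g lp)) d).getD k 0
      = d.getD k 0 + (ps.map (fun lp => if lp.2 = k then g lp else 0)).sum := by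
  induction ps generalizing d with
  | nil => simp
  | cons lp t ih =>
    rw [List.foldl_cons, ih, PySem.Dict.getD_modify, List.map_cons, List.sum_cons]
    by_cases h : lp.2 = k
    · rw [if_pos h.symm, if_pos h, h]; ring
    · rw [if_neg (fun hh => h hh.symm), if_neg h]; ring

-- a sum of guarded (x + y) splits into two guarded sums
theorem pvSum_split (ps : List (String × String)) (k : String) (x y : String × String → Int) :
    (ps.map (fun lp => if lp.2 = k then x lp + y lp else 0)).sum
      = (ps.map (fun lp => if lp.2 = k then x lp else 0)).sum
        + (ps.map (fun lp => if lp.2 = k then y lp else 0)).sum := by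
  induction ps with
  | nil => simp
  | cons lp t ih =>
    simp only [List.map_cons, List.sum_cons, ih]
    split_ifs <;> ring

-- with distinct keys, the guarded indicator sum is the first-match lookup
theorem pvSum_indicator (ps : List (String × String)) (k l : String)
    (hnd : (ps.map (·.1)).Nodup) :
    (ps.map (fun lp => if lp.2 = k then (if lp.1 = l then (1 : Int) else 0) else 0)).sum
      = if (PySem.Dict.mk ps).get? l = some k then 1 else 0 := by
  induction ps with
  | nil => simp [PySem.Dict.get?]
  | cons lp t ih =>
    have hnd1 : lp.1 ∉ t.map (·.1) := by
      simp only [List.map_cons] at hnd; exact (List.nodup_cons.mp hnd).1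
    have hnd' : (t.map (·.1)).Nodup := by
      simp only [List.map_cons] at hnd; exact (List.nodup_cons.mp hnd).2
    rw [List.map_cons, List.sum_cons, PySem.Dict.get?_mk_cons]
    by_cases hkey : lp.1 = l
    · -- head matches the key; the tail contains no key l, so its sum is 0
      have htail : (t.map (fun lp => if lp.2 = k then (if lp.1 = l then (1 : Int) else 0) else 0)).sum = 0 := by
        apply List.sum_eq_zero
        intro z hz
        rcases List.mem_map.mp hz with ⟨q, hq, hzq⟩
        have hq1 : q.1 ≠ l := fun he => hnd1 (by rw [hkey, ← he]; exact List.mem_map_of_mem hq)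
        rw [← hzq]
        by_cases h2 : q.2 = k
        · rw [if_pos h2, if_neg hq1]
        · rw [if_neg h2]
      by_cases hv : lp.2 = k <;> simp [htail, hkey, hv]
    · have hz : (if lp.2 = k then (if lp.1 = l then (1 : Int) else 0) else 0) = 0 := by
        by_cases h1 : lp.2 = k
        · rw [if_pos h1, if_neg hkey]
        · rw [if_neg h1]
      rw [hz, zero_add, ih hnd']
      simp [hkey]

-- the key identity: counting hits vehicle-major equals summing letter counts province-major
theorem pvExchange (ps : List (String × String)) (L : List String) (k : String)
    (hnd : (ps.map (·.1)).Nodup) :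
    ((L.filterMap (fun l => (PySem.Dict.mk ps).get? l)).count k : Int)
      = (ps.map (fun lp => if lp.2 = k then (L.count lp.1 : Int) else 0)).sum := by
  induction L with
  | nil => simp
  | cons l t ih =>
    have hcnt : ∀ a : String, ((l :: t).count a : Int) = (t.count a : Int) + (if a = l then 1 else 0) := by
      intro a
      rw [List.count_cons]
      push_cast
      by_cases h : a = l
      · simp [h]
      · simp [h, Ne.symm h]
    have hmap : (ps.map (fun lp => if lp.2 = k then ((l :: t).count lp.1 : Int) else 0))
        = (ps.map (fun lp => if lp.2 = k then (t.count lp.1 : Int) + (if lp.1 = l then 1 else 0) else 0)) := by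
      apply List.map_congr_left
      intro lp _
      rw [hcnt lp.1]
    rw [hmap, pvSum_split, ← ih, pvSum_indicator ps k l hnd, List.filterMap_cons]
    rcases hp : (PySem.Dict.mk ps).get? l with _ | p
    · simp
    · simp only [List.count_cons]
      push_cast
      by_cases h : p = k
      · simp [h]
      · simp [h]

-- the projection/initialisation keys: Set.update with already-present elements is the identity
theorem pvSet_update_subset (l : List String) (s : PySem.Set String)
    (h : ∀ x ∈ l, x ∈ s) : PySem.Set.update s l = s := by
  induction l generalizing s with
  | nil => rfl
  | cons x t ih =>
    have hx : PySem.Set.add s x = s := by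
      have hmem : x ∈ s := h x (List.mem_cons_self)
      simp [PySem.Set.add, PySem.Set.contains, hmem]
    simp only [PySem.Set.update, List.foldl_cons]
    rw [show List.foldl PySem.Set.add (PySem.Set.add s x) t
          = PySem.Set.update (PySem.Set.add s x) t from rfl, hx]
    exact ih s (fun y hy => h y (List.mem_cons_of_mem x hy))

-- every hit is one of the province names
theorem pvHit_mem_values (P : PySem.Dict String String) (v p : String)
    (h : pvHit P v = some p) : p ∈ P.values := by
  unfold pvHit at h
  rcases hl : pvLetter v with _ | l <;> rw [hl] at h
  · exact absurd h (by simp)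
  · have hm := PySem.Dict.mem_items_of_get?_eq_some P (h : P.get? l = some p)
    have : p ∈ P.items.map (·.2) := List.mem_map_of_mem hm
    simpa [PySem.Dict.values] using this

-- two dicts with the same Nodup key list and the same values have the same items
theorem pvItems_ext (dA dB : PySem.Dict String Int) (S : List String)
    (hA : dA.keys = S) (hB : dB.keys = S) (hnd : S.Nodup)
    (hval : ∀ k ∈ S, dA.getD k 0 = dB.getD k 0) : dA.items = dB.items := by
  rw [PySem.Dict.items_eq_map_keys dA (by rw [hA]; exact hnd) 0,
      PySem.Dict.items_eq_map_keys dB (by rw [hB]; exact hnd) 0, hA, hB]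
  exact List.map_congr_left (fun k hk => by rw [hval k hk])

-- ===== VERDICT (by name: the statement is the Claim_ definition above) =====
theorem count_vehicles_by_province_spec : Claim_equal_count_vehicles_by_province := by
  intro vns provinces _ hpre
  unfold Spec_count_vehicles_by_province count_vehicles_by_province count_vehicles_by_province_alt
  simp only []
  rw [pvA_loop_eq, pvB_hist_eq]
  apply pvItems_ext _ _ (PySem.Set.ofList (PySem.Dict.mk provinces).values)
  · -- A's keys
    have h1 := PySem.Dict.keys_foldl_insert (l := (PySem.Dict.mk provinces).values)
      (f := fun (_ : PySem.Dict String Int) (_ : String) => (0 : Int)) (d := PySem.Dict.empty)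
    have h2 := PySem.Dict.keys_foldl_modify (l := vns.filterMap (pvHit (PySem.Dict.mk provinces)))
      (d0 := (0 : Int)) (f := fun (_ : PySem.Dict String Int) (_ : String) => (· + 1))
      (d := (PySem.Dict.mk provinces).values.foldl (fun d province => d.insert province 0) PySem.Dict.empty)
    simp only [] at h1 h2
    rw [h2, h1]
    rw [show PySem.Set.update (PySem.Dict.empty : PySem.Dict String Int).keys
          (PySem.Dict.mk provinces).values = PySem.Set.ofList (PySem.Dict.mk provinces).values from rfl]
    apply pvSet_update_subset
    intro x hx
    rcases List.mem_filterMap.mp hx with ⟨v, _, hv⟩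
    exact (PySem.Set.mem_ofList _ _).mpr (pvHit_mem_values _ v x hv)
  · -- B's keys
    have h1 := PySem.Dict.keys_foldl_insert (l := (PySem.Dict.mk provinces).values)
      (f := fun (_ : PySem.Dict String Int) (_ : String) => (0 : Int)) (d := PySem.Dict.empty)
    have h2 := PySem.Dict.keys_foldl_modify_key (l := (PySem.Dict.mk provinces).items)
      (key := fun lp => lp.2) (d0 := (0 : Int))
      (f := fun (_ : PySem.Dict String Int) (lp : String × String) (x : Int) =>
        x + ((vns.filterMap pvLetter).foldl (fun d x => d.insert x (d.getD x 0 + 1)) PySem.Dict.empty).getD lp.1 0)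
      (d := (PySem.Dict.mk provinces).values.foldl (fun d province => d.insert province 0) PySem.Dict.empty)
    simp only [] at h1 h2
    rw [h2, h1]
    rw [show PySem.Set.update (PySem.Dict.empty : PySem.Dict String Int).keys
          (PySem.Dict.mk provinces).values = PySem.Set.ofList (PySem.Dict.mk provinces).values from rfl]
    rw [show ((PySem.Dict.mk provinces).items.map (fun lp => lp.2)) = (PySem.Dict.mk provinces).values from rfl]
    apply pvSet_update_subset
    intro x hx
    exact (PySem.Set.mem_ofList _ _).mpr hx
  · exact PySem.Set.nodup_ofList _
  · -- values agree
    intro k _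
    rw [PySem.Dict.getD_foldl_modify_add_one, pvInit_getD _ _ _ (by rfl), zero_add]
    rw [pvAgg_getD, pvInit_getD _ _ _ (by rfl), zero_add]
    rw [pvHit_decomp, pvExchange _ _ _ hpre.1]
    apply congrArg
    apply List.map_congr_left
    intro lp _
    rw [PySem.Dict.getD_foldl_insert_add_one]
    simp
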